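-- pv_equiv track=rewrite | github.com/Wuthichat/GPS-CDMA | Test_GPS-CMDA_26-Sep-24.py | receiver
-- ===== SOURCE A (Python) =====
-- num = 20
--
-- def receiver(signal, PRN):
--     signal_new = []
--     a_hat = []
--     for i in range(len(signal)):
--         signal_new.append(signal[i] * PRN[i%len(PRN)])
--     for j in range(0,len(signal_new),num):
--         a_hat.append(sum(signal_new[j:j+num]))
--
--     return a_hat
-- ===== SOURCE B (Python) =====
-- num = 20
--
-- def receiver(sig, PRN):
--     a_hat = []
--     cur = 0
--     n = len(PRN)
--     for i, x in enumerate(sig):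
--         if i > 0 and i % num == 0:
--             a_hat.append(cur)
--             cur = 0
--         cur += x * PRN[i % n]
--     if sig:
--         a_hat.append(cur)
--     return a_hat
-- ===== Notes on version B (the rewrite author's own statement) =====
-- stated objective: alternative
-- what changed: Fuses A's two passes (building the despread list, then summing 20-element slices) into one left-to-right pass with a running block accumulator and a final flush, with no intermediate list; same O(n) cost.
import Mathlib
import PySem

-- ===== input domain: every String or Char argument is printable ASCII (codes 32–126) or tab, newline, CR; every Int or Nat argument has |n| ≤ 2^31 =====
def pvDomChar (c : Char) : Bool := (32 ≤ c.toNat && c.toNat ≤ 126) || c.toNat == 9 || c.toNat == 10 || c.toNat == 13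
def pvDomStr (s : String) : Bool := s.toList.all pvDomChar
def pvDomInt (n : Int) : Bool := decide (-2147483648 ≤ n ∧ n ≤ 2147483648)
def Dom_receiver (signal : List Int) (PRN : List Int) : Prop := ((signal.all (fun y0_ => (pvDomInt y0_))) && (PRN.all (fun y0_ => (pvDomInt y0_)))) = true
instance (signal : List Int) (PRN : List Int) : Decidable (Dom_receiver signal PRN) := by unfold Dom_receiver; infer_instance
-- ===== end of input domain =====

-- B fuses A's two passes (despread list, then per-block slice sums) into one pass with a running block accumulator.

-- ===== PORT A =====
-- first loop: for i in range(len(signal)): signal_new.append(signal[i] * PRN[i%len(PRN)])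
-- (PRN[i%len(PRN)] ported with pyGetD default 0; Pre_receiver guarantees the index is in range)
def despreadLoop (signal : List Int) (PRN : List Int) (i : Nat) : List Int :=
  if _h : i < signal.length then
    PySem.List.pyGetD signal (i : Int) 0 * PySem.List.pyGetD PRN ((i % PRN.length : Nat) : Int) 0
      :: despreadLoop signal PRN (i + 1)
  else []
termination_by signal.length - i

-- second loop: for j in range(0, len(signal_new), 20): a_hat.append(sum(signal_new[j:j+20]))
def blockLoop (L : List Int) (j : Nat) : List Int :=
  if _h : j < L.length then
    (PySem.List.slice L (some (j : Int)) (some ((j : Int) + (20 : Nat))) ).foldl (· + ·) 0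
      :: blockLoop L (j + 20)
  else []
termination_by L.length - j

def receiver (signal : List Int) (PRN : List Int) : List Int :=
  blockLoop (despreadLoop signal PRN 0) 0

-- ===== PORT B =====
-- single pass: flush the running block sum when a new block of 20 begins, then add signal[i]*PRN[i%n]
def altLoop (PRN : List Int) : List Int → Nat → List Int → Int → List Int × Int
  | [], _, a_hat, cur => (a_hat, cur)
  | x :: xs, i, a_hat, cur =>
    let st := if 0 < i ∧ i % 20 = 0 then (a_hat ++ [cur], (0 : Int)) else (a_hat, cur)
    altLoop PRN xs (i + 1) st.1 (st.2 + x * PySem.List.pyGetD PRN ((i % PRN.length : Nat) : Int) 0)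

def receiver_alt (signal : List Int) (PRN : List Int) : List Int :=
  let st := altLoop PRN signal 0 [] 0
  if signal.isEmpty then st.1 else st.1 ++ [st.2]

-- ===== PRECONDITION & SPEC =====
-- Pre_ excludes exactly the inputs where the Pythons raise ZeroDivisionError (i % len(PRN) with PRN empty and signal nonempty); both A and B raise there.
def Pre_receiver (signal : List Int) (PRN : List Int) : Prop := signal = [] ∨ PRN ≠ []
instance (signal : List Int) (PRN : List Int) : Decidable (Pre_receiver signal PRN) := by unfold Pre_receiver; infer_instance
def pvWitness_receiver : List Int × List Int := ([1, -2, 3], [1, -1])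

def Spec_receiver (signal : List Int) (PRN : List Int) (out : List Int) : Prop := out = receiver_alt signal PRN
instance (signal : List Int) (PRN : List Int) (out : List Int) : Decidable (Spec_receiver signal PRN out) := by unfold Spec_receiver; infer_instance

-- ===== CLAIM (what is proved, stated in full; the proofs are below) =====
def Claim_equal_receiver : Prop := ∀ (signal : List Int) (PRN : List Int), Dom_receiver signal PRN → Pre_receiver signal PRN → Spec_receiver signal PRN (receiver signal PRN)

-- ===== LEMMAS AND PROOFS =====

-- the despread value stream starting at index i (common description of both ports' data)
def dmap (PRN : List Int) : List Int → Nat → List Int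
  | [], _ => []
  | x :: xs, i => x * PySem.List.pyGetD PRN ((i % PRN.length : Nat) : Int) 0 :: dmap PRN xs (i + 1)

-- chunk sums of size 20 (left folds, like Python's sum over each slice)
def chunk20 : List Int → List Int
  | [] => []
  | x :: xs => ((x :: xs).take 20).foldl (· + ·) 0 :: chunk20 ((x :: xs).drop 20)
termination_by L => L.length
decreasing_by simp

lemma chunk20_nil : chunk20 [] = [] := by rw [chunk20]

lemma chunk20_cons (x : Int) (xs : List Int) :
    chunk20 (x :: xs) = ((x :: xs).take 20).foldl (· + ·) 0 :: chunk20 ((x :: xs).drop 20) := by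
  rw [chunk20]

lemma despreadLoop_eq_dmap (signal PRN : List Int) (i : Nat) :
    despreadLoop signal PRN i = dmap PRN (signal.drop i) i := by
  have main : ∀ (k i : Nat), signal.length - i ≤ k →
      despreadLoop signal PRN i = dmap PRN (signal.drop i) i := by
    intro k
    induction k with
    | zero =>
      intro i hk
      have h : ¬ i < signal.length := by omega
      rw [despreadLoop]
      simp [h, List.drop_eq_nil_of_le (by omega : signal.length ≤ i), dmap]
    | succ k ih =>
      intro i hk
      by_cases h : i < signal.length
      · rw [despreadLoop]
        have hd : signal.drop i = signal[i] :: signal.drop (i + 1) := List.drop_eq_getElem_cons h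
        rw [hd, dmap, ← ih (i + 1) (by omega)]
        simp [h]
      · rw [despreadLoop]
        simp [h, List.drop_eq_nil_of_le (by omega : signal.length ≤ i), dmap]
  exact main (signal.length - i) i (le_refl _)

lemma blockLoop_eq_chunk20 (L : List Int) (j : Nat) :
    blockLoop L j = chunk20 (L.drop j) := by
  have main : ∀ (k j : Nat), L.length - j ≤ k → blockLoop L j = chunk20 (L.drop j) := by
    intro k
    induction k with
    | zero =>
      intro j hk
      have h : ¬ j < L.length := by omega
      rw [blockLoop]
      simp [h, List.drop_eq_nil_of_le (by omega : L.length ≤ j), chunk20_nil]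
    | succ k ih =>
      intro j hk
      by_cases h : j < L.length
      · have hne : L.drop j ≠ [] := by
          intro hcon
          have := congrArg List.length hcon
          simp at this
          omega
        obtain ⟨x, xs, hd⟩ := List.exists_cons_of_ne_nil hne
        have hs : PySem.List.slice L (some (j : Int)) (some ((j : Int) + (20 : Nat))) = (L.drop j).take 20 :=
          PySem.List.slice_natCast_add L j 20
        rw [blockLoop, dif_pos h, hs, ih (j + 20) (by omega), hd, chunk20_cons, ← hd]
        simp [List.drop_drop]
      · rw [blockLoop]
        simp [h, List.drop_eq_nil_of_le (by omega : L.length ≤ j), chunk20_nil]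
  exact main (L.length - j) j (le_refl _)

-- B's accumulator loop, re-expressed over the despread stream with a slot counter t
def fill : Int → Nat → List Int → List Int × Int
  | cur, _, [] => ([], cur)
  | cur, t, x :: xs =>
    if t = 0 then
      let p := fill x 19 xs
      (cur :: p.1, p.2)
    else fill (cur + x) (t - 1) xs

lemma foldl_add_shift (L : List Int) (c : Int) :
    L.foldl (· + ·) c = c + L.foldl (· + ·) 0 := by
  induction L generalizing c with
  | nil => simp
  | cons x xs ih => simp only [List.foldl_cons]; rw [ih (c + x), ih (0 + x)]; ring

lemma fill_chunk (L : List Int) (cur : Int) (t : Nat) :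
    (fill cur t L).1 ++ [(fill cur t L).2] = (cur + (L.take t).foldl (· + ·) 0) :: chunk20 (L.drop t) := by
  induction L generalizing cur t with
  | nil => simp [fill, chunk20_nil]
  | cons x xs ih =>
    by_cases ht : t = 0
    · subst ht
      have hstep : fill cur 0 (x :: xs) = (cur :: (fill x 19 xs).1, (fill x 19 xs).2) := by
        rw [fill]; simp
      rw [hstep]
      simp only [List.take_zero, List.foldl_nil, List.drop_zero, add_zero]
      rw [List.cons_append, ih x 19, chunk20_cons]
      have h20 : (20 : Nat) = 19 + 1 := rfl
      rw [h20, List.take_succ_cons, List.drop_succ_cons, List.foldl_cons,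
        foldl_add_shift (xs.take 19) (0 + x)]
      ring_nf
    · have hstep : fill cur t (x :: xs) = fill (cur + x) (t - 1) xs := by
        rw [fill, if_neg ht]
      rw [hstep, ih (cur + x) (t - 1)]
      obtain ⟨t', rfl⟩ : ∃ t', t = t' + 1 := ⟨t - 1, by omega⟩
      simp only [Nat.add_sub_cancel, List.take_succ_cons, List.drop_succ_cons, List.foldl_cons]
      rw [foldl_add_shift (xs.take t') (0 + x)]
      ring_nf

lemma altLoop_eq_fill (PRN : List Int) (xs : List Int) (i : Nat) (a : List Int) (cur : Int) (t : Nat)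
    (ht : (i = 0 ∧ t = 20) ∨ (0 < i ∧ t = (20 - i % 20) % 20)) :
    altLoop PRN xs i a cur =
      (a ++ (fill cur t (dmap PRN xs i)).1, (fill cur t (dmap PRN xs i)).2) := by
  induction xs generalizing i a cur t with
  | nil => simp [altLoop, dmap, fill]
  | cons x xs ih =>
    rw [altLoop, dmap]
    by_cases hf : 0 < i ∧ i % 20 = 0
    · have ht0 : t = 0 := by omega
      subst ht0
      simp only [if_pos hf]
      rw [ih (i + 1) (a ++ [cur]) _ 19 (by omega)]
      simp [fill]
    · have ht' : t ≠ 0 := by omega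
      simp only [if_neg hf]
      rw [ih (i + 1) a _ (t - 1) (by omega)]
      have : fill cur t (x * PySem.List.pyGetD PRN ((i % PRN.length : Nat) : Int) 0 :: dmap PRN xs (i + 1))
           = fill (cur + x * PySem.List.pyGetD PRN ((i % PRN.length : Nat) : Int) 0) (t - 1) (dmap PRN xs (i + 1)) := by
        rw [fill, if_neg ht']
      rw [this]

lemma receiver_alt_eq_chunk20 (signal PRN : List Int) :
    receiver_alt signal PRN = chunk20 (dmap PRN signal 0) := by
  unfold receiver_alt
  rw [altLoop_eq_fill PRN signal 0 [] 0 20 (Or.inl ⟨rfl, rfl⟩)]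
  cases signal with
  | nil => simp [dmap, fill, chunk20_nil]
  | cons x xs =>
    simp only [List.isEmpty_cons, if_neg (by decide : ¬ (false = true))]
    rw [List.nil_append, fill_chunk]
    have h20 : dmap PRN (x :: xs) 0 = x * PySem.List.pyGetD PRN ((0 % PRN.length : Nat) : Int) 0 :: dmap PRN xs 1 := rfl
    rw [h20, chunk20_cons]
    simp

-- ===== VERDICT (by name: the statement is the Claim_ definition above) =====
theorem receiver_spec : Claim_equal_receiver := by
  intro signal PRN _ _
  unfold Spec_receiver receiver
  rw [despreadLoop_eq_dmap, blockLoop_eq_chunk20, receiver_alt_eq_chunk20]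
  simp
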